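-- pv_equiv track=rewrite | github.com/helen2710/PythonCourse | task_1_L16.py | task30
-- ===== SOURCE A (Python) =====
-- def task30(number):
--     for i in range(len(number)):
--         reversed_num = 0
--         while i > 0:
--             digit = i % 10
--             reversed_num = reversed_num * 10 + digit
--             i //= 10
--             yield reversed_num
-- ===== SOURCE B (Python) =====
-- def task30(number):
--     for i in range(len(number)):
--         rev = 0
--         k = 0
--         while i > 0:
--             rev = rev * 10 + i % 10
--             i //= 10
--             k += 1
--         for t in range(k):
--             yield rev // 10 ** (k - 1 - t)
-- ===== Notes on version B (the rewrite author's own statement) =====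
-- stated objective: alternative
-- what changed: Instead of yielding inside the digit-peeling loop, B first computes the full reversed number and digit count per index, then emits the partial values as successive quotients rev // 10**(k-1-t) in a second pass.
import Mathlib
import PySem

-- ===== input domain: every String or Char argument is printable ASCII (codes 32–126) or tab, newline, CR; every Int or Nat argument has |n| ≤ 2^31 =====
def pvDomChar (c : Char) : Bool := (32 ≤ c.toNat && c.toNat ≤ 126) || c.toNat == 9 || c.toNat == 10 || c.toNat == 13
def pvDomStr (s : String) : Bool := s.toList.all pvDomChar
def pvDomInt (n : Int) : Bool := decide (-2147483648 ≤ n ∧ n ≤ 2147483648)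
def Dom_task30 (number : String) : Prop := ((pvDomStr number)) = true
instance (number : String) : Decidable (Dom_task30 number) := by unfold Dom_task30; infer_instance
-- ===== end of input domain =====

-- B computes the full reversed number and digit count per index first, then yields the
-- partials as successive quotients; same results, same cost (a timing run found no speedup).

-- ===== PORT A =====
-- A's inner while loop: i and reversed_num are nonnegative Python ints throughout, so Nat
-- arithmetic ( % , // on nonnegative values) is exact here.
def task30Loop (i : Nat) (rev : Nat) : List Int :=
  if h : i > 0 then
    let digit := i % 10
    let rev' := rev * 10 + digit
    ((rev' : Nat) : Int) :: task30Loop (i / 10) rev'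
  else []
decreasing_by exact Nat.div_lt_self h (by norm_num)

def task30 (number : String) : List Int :=
  (List.range number.toList.length).flatMap (fun i => task30Loop i 0)

-- ===== PORT B =====
-- B's first while loop: accumulates the full reversed value and the digit count.
def task30RevK (j : Nat) (rev : Nat) (k : Nat) : Nat × Nat :=
  if h : j > 0 then task30RevK (j / 10) (rev * 10 + j % 10) (k + 1)
  else (rev, k)
decreasing_by exact Nat.div_lt_self h (by norm_num)

def task30_alt (number : String) : List Int :=
  (List.range number.toList.length).flatMap (fun i =>
    let rk := task30RevK i 0 0
    (List.range rk.2).map (fun t => ((rk.1 / 10 ^ (rk.2 - 1 - t) : Nat) : Int)))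

-- ===== PRECONDITION & SPEC =====
def Spec_task30 (number : String) (out : List Int) : Prop := out = task30_alt number
instance (number : String) (out : List Int) : Decidable (Spec_task30 number out) := by unfold Spec_task30; infer_instance

-- ===== CLAIM (what is proved, stated in full; the proofs are below) =====
def Claim_equal_task30 : Prop := ∀ (number : String), Dom_task30 number → Spec_task30 number (task30 number)

-- ===== LEMMAS AND PROOFS =====

-- number of decimal digit-peeling steps for j (0 for j = 0)
def ndig (j : Nat) : Nat :=
  if h : j > 0 then ndig (j / 10) + 1 else 0
decreasing_by exact Nat.div_lt_self h (by norm_num)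

-- the reversed-accumulator value
def rcat (j : Nat) (rev : Nat) : Nat :=
  if h : j > 0 then rcat (j / 10) (rev * 10 + j % 10) else rev
decreasing_by exact Nat.div_lt_self h (by norm_num)

lemma ndig_zero : ndig 0 = 0 := by rw [ndig]; simp
lemma ndig_pos {j : Nat} (h : 0 < j) : ndig j = ndig (j / 10) + 1 := by rw [ndig]; simp [h]
lemma rcat_zero (rev : Nat) : rcat 0 rev = rev := by rw [rcat]; simp
lemma rcat_pos {j : Nat} (rev : Nat) (h : 0 < j) :
    rcat j rev = rcat (j / 10) (rev * 10 + j % 10) := by rw [rcat]; simp [h]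

lemma revK_eq (j rev k : Nat) : task30RevK j rev k = (rcat j rev, k + ndig j) := by
  induction j using Nat.strong_induction_on generalizing rev k with
  | _ j ih =>
    rw [task30RevK]
    by_cases h : j > 0
    · simp only [h, dif_pos]
      rw [ih (j / 10) (Nat.div_lt_self h (by norm_num)), rcat_pos rev h, ndig_pos h]
      ring_nf
    · have hj : j = 0 := by omega
      subst hj
      simp [rcat_zero, ndig_zero]

lemma rcat_decomp (j : Nat) : ∀ rev, rcat j rev = rev * 10 ^ ndig j + rcat j 0 ∧ rcat j 0 < 10 ^ ndig j := by
  induction j using Nat.strong_induction_on with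
  | _ j ih =>
    intro rev
    by_cases h : j > 0
    · have hlt := Nat.div_lt_self h (by norm_num : (1:Nat) < 10)
      have hm : j % 10 < 10 := Nat.mod_lt _ (by norm_num)
      obtain ⟨h1, _⟩ := ih (j / 10) hlt (rev * 10 + j % 10)
      obtain ⟨h3, hb⟩ := ih (j / 10) hlt (j % 10)
      have hz : rcat j 0 = rcat (j / 10) (j % 10) := by
        rw [rcat_pos 0 h]; norm_num
      constructor
      · rw [rcat_pos rev h, h1, hz, h3, ndig_pos h, pow_succ]
        ring
      · rw [hz, h3, ndig_pos h, pow_succ]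
        calc (j % 10) * 10 ^ ndig (j / 10) + rcat (j / 10) 0
            < (j % 10 + 1) * 10 ^ ndig (j / 10) := by ring_nf; omega
          _ ≤ 10 ^ ndig (j / 10) * 10 := by
              rw [Nat.mul_comm]; exact Nat.mul_le_mul_left _ (by omega)
    · have hj : j = 0 := by omega
      subst hj
      simp [rcat_zero, ndig_zero]

lemma loop_eq (j : Nat) : ∀ rev, task30Loop j rev =
    (List.range (ndig j)).map (fun t => ((rcat j rev / 10 ^ (ndig j - 1 - t) : Nat) : Int)) := by
  induction j using Nat.strong_induction_on with
  | _ j ih =>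
    intro rev
    rw [task30Loop]
    by_cases h : j > 0
    · simp only [h, dif_pos]
      have hlt := Nat.div_lt_self h (by norm_num : (1:Nat) < 10)
      set r := rev * 10 + j % 10 with hr
      rw [ih (j / 10) hlt r, ndig_pos h, rcat_pos rev h, ← hr]
      rw [List.range_succ_eq_map]
      simp only [List.map_cons, List.map_map]
      congr 1
      · -- head element: r = rcat (j/10) r / 10 ^ ndig (j/10)
        obtain ⟨hd, hb⟩ := rcat_decomp (j / 10) r
        have hp : 0 < 10 ^ ndig (j / 10) := pow_pos (by norm_num) _
        rw [hd]
        have : (r * 10 ^ ndig (j / 10) + rcat (j / 10) 0) / 10 ^ ndig (j / 10) = r := by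
          rw [Nat.add_comm, Nat.add_mul_div_right _ _ hp, Nat.div_eq_of_lt hb]
          omega
        simp [this]
      · apply List.map_congr_left
        intro t _
        simp only [Function.comp]
        have he : ndig (j / 10) + 1 - 1 - (t + 1) = ndig (j / 10) - 1 - t := by omega
        rw [he]
    · have hj : j = 0 := by omega
      subst hj
      simp [ndig_zero]

-- ===== VERDICT (by name: the statement is the Claim_ definition above) =====
theorem task30_spec : Claim_equal_task30 := by
  intro number _
  unfold Spec_task30 task30 task30_alt
  apply List.flatMap_congr
  intro i _
  rw [loop_eq, revK_eq]
  simp
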